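-- pv_equiv track=rewrite | github.com/mucun1988/orp | oso/utils.py | create_layout_from_result
-- ===== SOURCE A (Python) =====
-- def create_layout_from_result(result, nl):
--     layout = [[{'skus': [], 'x': [], 'y': [], 'n': []} for j in range(nl)]
--                       for i in range(1)]
--
--     for sku_id in result.keys():
--         rs = result[sku_id]
--         if 'shelf' in rs.keys():  # skus allocated
--             shelf = rs['shelf']
--             layer = rs['layer']
--             x = rs['x']
--             y = rs['y']
--             n = rs['n']
--             for i in range(len(rs['shelf'])):
--                 layout[shelf[i]][layer[i]]['skus'].append(sku_id)
--                 layout[shelf[i]][layer[i]]['x'].append(x[i])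
--                 layout[shelf[i]][layer[i]]['y'].append(y[i])
--                 layout[shelf[i]][layer[i]]['n'].append(n[i])
--
--     # sorting
--     for i in range(1):
--         for j in range(nl):
--             s = layout[i][j]['x']
--             if len(s) > 1:
--                 idx = sorted(range(len(s)), key=lambda k: s[k])
--                 layout[i][j]['skus'] = list(map(lambda _: layout[i][j]['skus'][_], idx))
--                 layout[i][j]['x'] = list(map(lambda _: layout[i][j]['x'][_], idx))
--                 layout[i][j]['y'] = list(map(lambda _: layout[i][j]['y'][_], idx))
--                 layout[i][j]['n'] = list(map(lambda _: layout[i][j]['n'][_], idx))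
--
--     return layout
-- ===== SOURCE B (Python) =====
-- def create_layout_from_result(result, nl):
--     # flatten allocated placements into one record list, stable-sort by x, then distribute
--     flat = []
--     for sku_id in result.keys():
--         rs = result[sku_id]
--         if 'shelf' in rs.keys():
--             shelf = rs['shelf']
--             layer = rs['layer']
--             x = rs['x']
--             y = rs['y']
--             n = rs['n']
--             for i in range(len(shelf)):
--                 flat.append((x[i], sku_id, y[i], n[i], shelf[i], layer[i]))
--     flat.sort(key=lambda r: r[0])  # stable: ties keep insertion order
--     layout = [[{'skus': [], 'x': [], 'y': [], 'n': []} for _ in range(nl)]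
--               for _ in range(1)]
--     for xv, sku_id, yv, nv, s, l in flat:
--         cell = layout[s][l]
--         cell['skus'].append(sku_id)
--         cell['x'].append(xv)
--         cell['y'].append(yv)
--         cell['n'].append(nv)
--     return layout
-- ===== Notes on version B (the rewrite author's own statement) =====
-- stated objective: alternative
-- what changed: A appends placements into the grid and then argsorts each cell's four parallel lists by x with an index permutation; B flattens all placements into one record list, stable-sorts it once by x, and distributes the sorted records into the grid in a single pass, so no per-cell permutation step exists.
import Mathlib
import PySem

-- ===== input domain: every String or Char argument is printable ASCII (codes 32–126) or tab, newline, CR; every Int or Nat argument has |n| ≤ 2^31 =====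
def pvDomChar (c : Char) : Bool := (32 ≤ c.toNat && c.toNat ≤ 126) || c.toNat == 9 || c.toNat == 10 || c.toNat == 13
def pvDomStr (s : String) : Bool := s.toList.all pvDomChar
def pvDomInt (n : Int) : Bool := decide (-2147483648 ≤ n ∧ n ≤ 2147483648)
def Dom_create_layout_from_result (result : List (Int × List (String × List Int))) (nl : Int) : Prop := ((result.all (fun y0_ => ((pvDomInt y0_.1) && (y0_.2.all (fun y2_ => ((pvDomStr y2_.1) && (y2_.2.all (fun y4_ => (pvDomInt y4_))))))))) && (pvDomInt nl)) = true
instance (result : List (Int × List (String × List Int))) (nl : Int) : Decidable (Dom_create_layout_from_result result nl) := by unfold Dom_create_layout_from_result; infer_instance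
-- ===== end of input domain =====

-- B replaces A's per-cell argsort pass by one global stable sort of the flattened
-- placement records followed by a single distribution pass (objective: alternative).

-- ===== PORT A =====

-- shared literal pieces of both Pythons: the empty cell dict and rs[key] lookup
def pvCellEmpty : List (String × List Int) := [("skus", []), ("x", []), ("y", []), ("n", [])]

def pvGet (rs : List (String × List Int)) (k : String) : List Int :=
  (PySem.Dict.get? ⟨rs⟩ k).getD []

-- the inner 'for i in range(len(rs['shelf']))' loop of A
def pvAInner (sku : Int) (shelf layer x y n : List Int)
    (L : List (List (List (String × List Int)))) : List (List (List (String × List Int))) :=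
  (PySem.List.pyRange 0 (PySem.List.len shelf) 1).foldl (fun L i =>
    let s := PySem.List.pyGetD shelf i 0
    let l := PySem.List.pyGetD layer i 0
    let row := PySem.List.pyGetD L s []
    let cell := PySem.List.pyGetD row l []
    let cell := (PySem.Dict.modify ⟨cell⟩ "skus" [] (· ++ [sku])).items
    let cell := (PySem.Dict.modify ⟨cell⟩ "x" [] (· ++ [PySem.List.pyGetD x i 0])).items
    let cell := (PySem.Dict.modify ⟨cell⟩ "y" [] (· ++ [PySem.List.pyGetD y i 0])).items
    let cell := (PySem.Dict.modify ⟨cell⟩ "n" [] (· ++ [PySem.List.pyGetD n i 0])).items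
    PySem.List.pySetD L s (PySem.List.pySetD row l cell)) L

-- the per-cell sorting step of A's second pass
def pvASortCell (cell : List (String × List Int)) : List (String × List Int) :=
  let s := pvGet cell "x"
  if 1 < PySem.List.len s then
    let idx := PySem.List.sorted (PySem.List.pyRange 0 (PySem.List.len s) 1)
      (fun k => PySem.List.pyGetD s k 0) false
    let cell' := (PySem.Dict.insert ⟨cell⟩ "skus"
      (idx.map (fun k => PySem.List.pyGetD (pvGet cell "skus") k 0))).items
    let cell' := (PySem.Dict.insert ⟨cell'⟩ "x"
      (idx.map (fun k => PySem.List.pyGetD (pvGet cell "x") k 0))).items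
    let cell' := (PySem.Dict.insert ⟨cell'⟩ "y"
      (idx.map (fun k => PySem.List.pyGetD (pvGet cell "y") k 0))).items
    let cell' := (PySem.Dict.insert ⟨cell'⟩ "n"
      (idx.map (fun k => PySem.List.pyGetD (pvGet cell "n") k 0))).items
    cell'
  else cell

def create_layout_from_result (result : List (Int × List (String × List Int))) (nl : Int) :
    List (List (List (String × List Int))) :=
  (PySem.List.pyRange 0 1 1).foldl (fun L i =>
    (PySem.List.pyRange 0 nl 1).foldl (fun L j =>
      PySem.List.pySetD L i (PySem.List.pySetD (PySem.List.pyGetD L i []) j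
        (pvASortCell (PySem.List.pyGetD (PySem.List.pyGetD L i []) j [])))) L)
    (result.foldl (fun L p =>
      let rs := (PySem.Dict.get? ⟨result⟩ p.1).getD []
      if PySem.Dict.contains ⟨rs⟩ "shelf" then
        pvAInner p.1 (pvGet rs "shelf") (pvGet rs "layer") (pvGet rs "x") (pvGet rs "y")
          (pvGet rs "n") L
      else L)
      ((PySem.List.pyRange 0 1 1).map (fun _ =>
        (PySem.List.pyRange 0 nl 1).map (fun _ => pvCellEmpty))))


-- ===== PORT B =====
-- flatten all allocated placements into records (x, sku, y, n, shelf, layer)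
def pvBRecords (result : List (Int × List (String × List Int))) :
    List (Int × Int × Int × Int × Int × Int) :=
  result.foldl (fun acc p =>
    let rs := (PySem.Dict.get? ⟨result⟩ p.1).getD []
    if PySem.Dict.contains ⟨rs⟩ "shelf" then
      let shelf := pvGet rs "shelf"
      let layer := pvGet rs "layer"
      let x := pvGet rs "x"
      let y := pvGet rs "y"
      let n := pvGet rs "n"
      (PySem.List.pyRange 0 (PySem.List.len shelf) 1).foldl (fun acc i =>
        acc ++ [(PySem.List.pyGetD x i 0, p.1, PySem.List.pyGetD y i 0,
          PySem.List.pyGetD n i 0, PySem.List.pyGetD shelf i 0,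
          PySem.List.pyGetD layer i 0)]) acc
    else acc) []

-- distribute one sorted record into the grid
def pvBStep (L : List (List (List (String × List Int))))
    (r : Int × Int × Int × Int × Int × Int) : List (List (List (String × List Int))) :=
  let row := PySem.List.pyGetD L r.2.2.2.2.1 []
  let cell := PySem.List.pyGetD row r.2.2.2.2.2 []
  let cell := (PySem.Dict.modify ⟨cell⟩ "skus" [] (· ++ [r.2.1])).items
  let cell := (PySem.Dict.modify ⟨cell⟩ "x" [] (· ++ [r.1])).items
  let cell := (PySem.Dict.modify ⟨cell⟩ "y" [] (· ++ [r.2.2.1])).items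
  let cell := (PySem.Dict.modify ⟨cell⟩ "n" [] (· ++ [r.2.2.2.1])).items
  PySem.List.pySetD L r.2.2.2.2.1 (PySem.List.pySetD row r.2.2.2.2.2 cell)

def create_layout_from_result_alt (result : List (Int × List (String × List Int))) (nl : Int) :
    List (List (List (String × List Int))) :=
  (PySem.List.sorted (pvBRecords result) (fun r => r.1) false).foldl pvBStep
    ((PySem.List.pyRange 0 1 1).map (fun _ =>
      (PySem.List.pyRange 0 nl 1).map (fun _ => pvCellEmpty)))


-- ===== PRECONDITION & SPEC =====
-- Pre_ excludes (a) association lists with duplicate outer or inner dict keys, where the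
-- list-to-Python-dict conversion collapses entries and the representation is ambiguous, and
-- (b) exactly the inputs on which the Python A raises: a missing 'layer'/'x'/'y'/'n' key
-- next to 'shelf' (KeyError), a layer/x/y/n list shorter than the shelf list, or a
-- shelf/layer index outside the 1 x nl grid (IndexError).
def Pre_create_layout_from_result (result : List (Int × List (String × List Int))) (nl : Int) : Prop :=
  (result.map Prod.fst).Nodup ∧
  ∀ p ∈ result, (p.2.map Prod.fst).Nodup ∧
    (PySem.Dict.contains ⟨p.2⟩ "shelf" = true →
      PySem.Dict.contains ⟨p.2⟩ "layer" = true ∧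
      PySem.Dict.contains ⟨p.2⟩ "x" = true ∧
      PySem.Dict.contains ⟨p.2⟩ "y" = true ∧
      PySem.Dict.contains ⟨p.2⟩ "n" = true ∧
      ∀ i < (pvGet p.2 "shelf").length,
        i < (pvGet p.2 "layer").length ∧ i < (pvGet p.2 "x").length ∧
        i < (pvGet p.2 "y").length ∧ i < (pvGet p.2 "n").length ∧
        PySem.Raise.InRange 1 ((pvGet p.2 "shelf").getD i 0) ∧
        PySem.Raise.InRange nl.toNat ((pvGet p.2 "layer").getD i 0))
instance (result : List (Int × List (String × List Int))) (nl : Int) :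
    Decidable (Pre_create_layout_from_result result nl) := by
  unfold Pre_create_layout_from_result; infer_instance

def pvWitness_create_layout_from_result : (List (Int × List (String × List Int))) × Int :=
  ([(7, [("shelf", [0, 0]), ("layer", [1, 0]), ("x", [5, 2]), ("y", [1, 1]), ("n", [3, 4])]),
    (9, [("noshelf", [])])], 2)

def Spec_create_layout_from_result (result : List (Int × List (String × List Int))) (nl : Int)
    (out : List (List (List (String × List Int)))) : Prop :=
  out = create_layout_from_result_alt result nl
instance (result : List (Int × List (String × List Int))) (nl : Int)
    (out : List (List (List (String × List Int)))) :
    Decidable (Spec_create_layout_from_result result nl out) := by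
  unfold Spec_create_layout_from_result; infer_instance

-- ===== CLAIM (what is proved, stated in full; the proofs are below) =====
def Claim_equal_create_layout_from_result : Prop := ∀ (result : List (Int × List (String × List Int))) (nl : Int), Dom_create_layout_from_result result nl → Pre_create_layout_from_result result nl → Spec_create_layout_from_result result nl (create_layout_from_result result nl)

-- ===== LEMMAS AND PROOFS =====

-- low-level helpers
def pvRes (n : Nat) (i : Int) : Nat := if 0 ≤ i then i.toNat else n - (-i).toNat

def pvCell4 (a b c d : List Int) : List (String × List Int) :=
  [("skus", a), ("x", b), ("y", c), ("n", d)]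

def pvAdd (cell : List (String × List Int)) (r : Int × Int × Int × Int × Int × Int) :
    List (String × List Int) :=
  let c := (PySem.Dict.modify ⟨cell⟩ "skus" [] (· ++ [r.2.1])).items
  let c := (PySem.Dict.modify ⟨c⟩ "x" [] (· ++ [r.1])).items
  let c := (PySem.Dict.modify ⟨c⟩ "y" [] (· ++ [r.2.2.1])).items
  (PySem.Dict.modify ⟨c⟩ "n" [] (· ++ [r.2.2.2.1])).items

theorem pvAdd_cell4 (a b c d : List Int) (r : Int × Int × Int × Int × Int × Int) :
    pvAdd (pvCell4 a b c d) r =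
      pvCell4 (a ++ [r.2.1]) (b ++ [r.1]) (c ++ [r.2.2.1]) (d ++ [r.2.2.2.1]) := rfl

theorem pvCellEmpty_eq : pvCellEmpty = pvCell4 [] [] [] [] := rfl

theorem pvBStep_eq (L : List (List (List (String × List Int))))
    (r : Int × Int × Int × Int × Int × Int) :
    pvBStep L r = PySem.List.pySetD L r.2.2.2.2.1
      (PySem.List.pySetD (PySem.List.pyGetD L r.2.2.2.2.1 []) r.2.2.2.2.2
        (pvAdd (PySem.List.pyGetD (PySem.List.pyGetD L r.2.2.2.2.1 []) r.2.2.2.2.2 []) r)) := rfl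

theorem pvRes_lt {n : Nat} {i : Int} (h : PySem.Raise.InRange n i) : pvRes n i < n := by
  obtain ⟨h1, h2⟩ := h; unfold pvRes; split_ifs with h0 <;> omega

theorem pyGetD_res {α : Type} (xs : List α) (i : Int) (d : α)
    (h : PySem.Raise.InRange xs.length i) :
    PySem.List.pyGetD xs i d = xs.getD (pvRes xs.length i) d := by
  obtain ⟨h1, h2⟩ := h
  simp only [PySem.List.pyGetD, PySem.List.pyGet?, PySem.List.pyIdx?, pvRes]
  split_ifs with h0
  · simp [List.getD, show i.toNat < xs.length by omega]
  · simp [List.getD]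

theorem pySetD_res {α : Type} (xs : List α) (i : Int) (v : α)
    (h : PySem.Raise.InRange xs.length i) :
    PySem.List.pySetD xs i v = xs.set (pvRes xs.length i) v := by
  obtain ⟨h1, h2⟩ := h
  simp only [PySem.List.pySetD, PySem.List.pySet?, PySem.List.pyIdx?, pvRes]
  split_ifs with h0
  · simp
  · simp

theorem pyGetD_singleton {α : Type} (r : α) (i : Int) (d : α) (h : PySem.Raise.InRange 1 i) :
    PySem.List.pyGetD [r] i d = r := by
  rw [pyGetD_res [r] i d (by simpa using h)]
  have h0 : pvRes 1 i = 0 := by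
    have := pvRes_lt (n := 1) (i := i) (by simpa using h); omega
  simp only [List.length_singleton] at *
  rw [h0]; simp [List.getD]

theorem pySetD_singleton {α : Type} (r : α) (i : Int) (v : α) (h : PySem.Raise.InRange 1 i) :
    PySem.List.pySetD [r] i v = [v] := by
  rw [pySetD_res [r] i v (by simpa using h)]
  have h0 : pvRes 1 i = 0 := by
    have := pvRes_lt (n := 1) (i := i) (by simpa using h); omega
  simp only [List.length_singleton] at *
  rw [h0]; simp
-- validity and row-level distribution
def pvValid (m : Nat) (r : Int × Int × Int × Int × Int × Int) : Prop :=
  PySem.Raise.InRange 1 r.2.2.2.2.1 ∧ PySem.Raise.InRange m r.2.2.2.2.2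

def pvDistRow (rs : List (Int × Int × Int × Int × Int × Int))
    (row : List (List (String × List Int))) : List (List (String × List Int)) :=
  rs.foldl (fun row r => row.set (pvRes row.length r.2.2.2.2.2)
    (pvAdd (row.getD (pvRes row.length r.2.2.2.2.2) []) r)) row

theorem pvDistRow_length (rs : List (Int × Int × Int × Int × Int × Int))
    (row : List (List (String × List Int))) : (pvDistRow rs row).length = row.length := by
  induction rs generalizing row with
  | nil => rfl
  | cons r rs ih =>
    rw [pvDistRow, List.foldl_cons]
    rw [show ∀ init, List.foldl (fun row r => row.set (pvRes row.length r.2.2.2.2.2)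
      (pvAdd (row.getD (pvRes row.length r.2.2.2.2.2) []) r)) init rs = pvDistRow rs init
      from fun _ => rfl, ih]
    simp

theorem pvDist_singleton (rs : List (Int × Int × Int × Int × Int × Int))
    (row : List (List (String × List Int))) (hv : ∀ r ∈ rs, pvValid row.length r) :
    rs.foldl pvBStep [row] = [pvDistRow rs row] := by
  induction rs generalizing row with
  | nil => rfl
  | cons r rs ih =>
    obtain ⟨hs, hl⟩ := hv r (by simp)
    have h1 : PySem.List.pyGetD [row] r.2.2.2.2.1 ([] : List (List (String × List Int))) = row :=
      pyGetD_singleton _ _ _ hs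
    simp only [List.foldl_cons, pvBStep_eq, h1, pySetD_singleton _ _ _ hs,
      pyGetD_res _ _ _ hl, pySetD_res _ _ _ hl]
    rw [ih _ (by intro q hq; simpa using (hv q (by simp [hq])))]
    simp [pvDistRow]

theorem pvDistRow_getD (rs : List (Int × Int × Int × Int × Int × Int))
    (row : List (List (String × List Int))) (hv : ∀ r ∈ rs, pvValid row.length r)
    (j : Nat) (hj : j < row.length) :
    (pvDistRow rs row).getD j [] =
      (rs.filter (fun r => pvRes row.length r.2.2.2.2.2 == j)).foldl pvAdd (row.getD j []) := by
  induction rs generalizing row with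
  | nil => rfl
  | cons r rs ih =>
    obtain ⟨hs, hl⟩ := hv r (by simp)
    have hk : pvRes row.length r.2.2.2.2.2 < row.length := pvRes_lt hl
    have hrow' : (row.set (pvRes row.length r.2.2.2.2.2)
        (pvAdd (row.getD (pvRes row.length r.2.2.2.2.2) []) r)).length = row.length := by simp
    have := ih (row.set (pvRes row.length r.2.2.2.2.2)
        (pvAdd (row.getD (pvRes row.length r.2.2.2.2.2) []) r))
      (by intro q hq; rw [hrow']; exact hv q (by simp [hq])) (by rwa [hrow'])
    simp only [pvDistRow, List.foldl_cons] at this ⊢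
    rw [this, hrow']
    by_cases hje : pvRes row.length r.2.2.2.2.2 = j
    · subst hje
      simp [List.getD, List.getElem?_set, hk]
    · simp [List.getD, List.getElem?_set, hje, Ne.symm hje]
-- flat record list
def pvRecsOf (sku : Int) (shelf layer x y n : List Int) : List (Int × Int × Int × Int × Int × Int) :=
  (PySem.List.pyRange 0 (PySem.List.len shelf) 1).map (fun i =>
    (PySem.List.pyGetD x i 0, sku, PySem.List.pyGetD y i 0, PySem.List.pyGetD n i 0,
     PySem.List.pyGetD shelf i 0, PySem.List.pyGetD layer i 0))

def pvFlatten (result : List (Int × List (String × List Int))) :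
    List (Int × Int × Int × Int × Int × Int) :=
  result.flatMap (fun p =>
    let rs := (PySem.Dict.get? ⟨result⟩ p.1).getD []
    if PySem.Dict.contains ⟨rs⟩ "shelf" then
      pvRecsOf p.1 (pvGet rs "shelf") (pvGet rs "layer") (pvGet rs "x") (pvGet rs "y")
        (pvGet rs "n")
    else [])

theorem pvAInner_eq (sku : Int) (shelf layer x y n : List Int)
    (L : List (List (List (String × List Int)))) :
    pvAInner sku shelf layer x y n L = (pvRecsOf sku shelf layer x y n).foldl pvBStep L := by
  unfold pvAInner pvRecsOf
  rw [List.foldl_map]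
  rfl

theorem pvBRecords_eq (result : List (Int × List (String × List Int))) :
    pvBRecords result = pvFlatten result := by
  unfold pvBRecords pvFlatten
  have hbody : ∀ (acc : List (Int × Int × Int × Int × Int × Int))
      (p : Int × List (String × List Int)),
      (let rs := (PySem.Dict.get? ⟨result⟩ p.1).getD []
       if PySem.Dict.contains ⟨rs⟩ "shelf" then
         let shelf := pvGet rs "shelf"
         let layer := pvGet rs "layer"
         let x := pvGet rs "x"
         let y := pvGet rs "y"
         let n := pvGet rs "n"
         (PySem.List.pyRange 0 (PySem.List.len shelf) 1).foldl (fun acc i =>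
           acc ++ [(PySem.List.pyGetD x i 0, p.1, PySem.List.pyGetD y i 0,
             PySem.List.pyGetD n i 0, PySem.List.pyGetD shelf i 0,
             PySem.List.pyGetD layer i 0)]) acc
       else acc) =
      acc ++ (let rs := (PySem.Dict.get? ⟨result⟩ p.1).getD []
        if PySem.Dict.contains ⟨rs⟩ "shelf" then
          pvRecsOf p.1 (pvGet rs "shelf") (pvGet rs "layer") (pvGet rs "x") (pvGet rs "y")
            (pvGet rs "n")
        else []) := by
    intro acc p
    by_cases hc : PySem.Dict.contains (⟨(PySem.Dict.get? ⟨result⟩ p.1).getD []⟩ :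
        PySem.Dict String (List Int)) "shelf"
    · simp only [hc, if_true, pvRecsOf, PySem.List.foldl_append_singleton_eq_map]
    · simp [hc]
  calc List.foldl _ [] result = List.foldl (fun acc p =>
        acc ++ (let rs := (PySem.Dict.get? ⟨result⟩ p.1).getD []
          if PySem.Dict.contains ⟨rs⟩ "shelf" then
            pvRecsOf p.1 (pvGet rs "shelf") (pvGet rs "layer") (pvGet rs "x") (pvGet rs "y")
              (pvGet rs "n")
          else [])) [] result := by
        exact PySem.List.foldl_congr_mem _ _ _ _ (fun acc p _ => hbody acc p)
    _ = _ := by rw [PySem.List.foldl_append_eq_flatMap]; rfl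

theorem pvFold_inner_flat {P : Type} (c : P → Bool) (h : P → List (Int × Int × Int × Int × Int × Int))
    (ps : List P) (L : List (List (List (String × List Int)))) :
    ps.foldl (fun L p => if c p then (h p).foldl pvBStep L else L) L =
      (ps.flatMap (fun p => if c p then h p else [])).foldl pvBStep L := by
  induction ps generalizing L with
  | nil => rfl
  | cons p ps ih =>
    simp only [List.foldl_cons, List.flatMap_cons, List.foldl_append]
    rw [ih]
    by_cases hc : c p <;> simp [hc]

theorem pvPhase1_eq (result : List (Int × List (String × List Int)))
    (L : List (List (List (String × List Int)))) :
    result.foldl (fun L p =>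
      let rs := (PySem.Dict.get? ⟨result⟩ p.1).getD []
      if PySem.Dict.contains ⟨rs⟩ "shelf" then
        pvAInner p.1 (pvGet rs "shelf") (pvGet rs "layer") (pvGet rs "x") (pvGet rs "y")
          (pvGet rs "n") L
      else L) L = (pvFlatten result).foldl pvBStep L := by
  have := pvFold_inner_flat
    (fun p : Int × List (String × List Int) =>
      PySem.Dict.contains (⟨(PySem.Dict.get? ⟨result⟩ p.1).getD []⟩ : PySem.Dict String (List Int)) "shelf")
    (fun p =>
      let rs := (PySem.Dict.get? ⟨result⟩ p.1).getD []
      pvRecsOf p.1 (pvGet rs "shelf") (pvGet rs "layer") (pvGet rs "x") (pvGet rs "y")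
        (pvGet rs "n")) result L
  simp only [pvAInner_eq]
  exact this
-- stable-sort library lemmas (Int keys)
theorem pvInsertBy_cons_of_all {α : Type} (bef : α → α → Bool) (x : α) (l : List α)
    (h : ∀ z ∈ l, bef x z = true) : PySem.List.insertBy bef x l = x :: l := by
  cases l with
  | nil => rfl
  | cons y l => simp [PySem.List.insertBy, h y (by simp)]

theorem pvInsertBy_map {α β : Type} (φ : α → β) (f : β → Int) (x : α) (l : List α) :
    PySem.List.insertBy (fun a b => decide (f a < f b)) (φ x) (l.map φ) =
      (PySem.List.insertBy (fun a b => decide (f (φ a) < f (φ b))) x l).map φ := by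
  induction l with
  | nil => rfl
  | cons y l ih =>
    simp only [List.map_cons, PySem.List.insertBy]
    by_cases h : f (φ x) < f (φ y) <;> simp [h, ih]

theorem pvSorted_map {α β : Type} (φ : α → β) (f : β → Int) (l : List α) :
    PySem.List.sorted (l.map φ) f false =
      (PySem.List.sorted l (fun a => f (φ a)) false).map φ := by
  rw [PySem.List.sorted_eq_foldl_insertBy, PySem.List.sorted_eq_foldl_insertBy]
  suffices h : ∀ acc : List α,
      (l.map φ).foldl (fun acc x => PySem.List.insertBy (fun a b => decide (f a < f b)) x acc)
        (acc.map φ) =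
      (l.foldl (fun acc x => PySem.List.insertBy (fun a b => decide (f (φ a) < f (φ b))) x acc)
        acc).map φ by
    simpa using h []
  induction l with
  | nil => intro acc; rfl
  | cons y l ih =>
    intro acc
    simp only [List.map_cons, List.foldl_cons]
    rw [pvInsertBy_map]
    exact ih _

theorem pvInsertBy_congr {α : Type} (bef bef' : α → α → Bool) (x : α) (l : List α)
    (h : ∀ y ∈ l, bef x y = bef' x y) :
    PySem.List.insertBy bef x l = PySem.List.insertBy bef' x l := by
  induction l with
  | nil => rfl
  | cons y l ih =>
    simp only [PySem.List.insertBy]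
    rw [h y (by simp)]
    by_cases hb : bef' x y <;> simp [hb, ih (fun z hz => h z (by simp [hz]))]

theorem pvSorted_key_congr_mem {α : Type} (f g : α → Int) (l : List α)
    (h : ∀ a ∈ l, f a = g a) :
    PySem.List.sorted l f false = PySem.List.sorted l g false := by
  rw [PySem.List.sorted_eq_foldl_insertBy, PySem.List.sorted_eq_foldl_insertBy]
  suffices hh : ∀ acc : List α, (∀ a ∈ acc, f a = g a) →
      l.foldl (fun acc x => PySem.List.insertBy (fun a b => decide (f a < f b)) x acc) acc =
      l.foldl (fun acc x => PySem.List.insertBy (fun a b => decide (g a < g b)) x acc) acc by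
    exact hh [] (by simp)
  induction l with
  | nil => intro acc _; rfl
  | cons x l ih =>
    intro acc hacc
    have hx : f x = g x := h x (by simp)
    simp only [List.foldl_cons]
    have hins : PySem.List.insertBy (fun a b => decide (f a < f b)) x acc =
        PySem.List.insertBy (fun a b => decide (g a < g b)) x acc := by
      apply pvInsertBy_congr
      intro y hy
      rw [hx, hacc y hy]
    rw [hins]
    refine ih (fun a ha => h a (by simp [ha])) _ ?_
    intro a ha
    rw [PySem.List.mem_insertBy] at ha
    rcases ha with rfl | ha
    · exact hx
    · exact hacc a ha

theorem pvPairwise_insertBy {α : Type} (f : α → Int) (x : α) (l : List α)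
    (h : l.Pairwise (fun a b => f a ≤ f b)) :
    (PySem.List.insertBy (fun a b => decide (f a < f b)) x l).Pairwise
      (fun a b => f a ≤ f b) := by
  induction l with
  | nil => simp [PySem.List.insertBy]
  | cons y l ih =>
    rw [List.pairwise_cons] at h
    obtain ⟨hy, hl⟩ := h
    simp only [PySem.List.insertBy]
    by_cases hb : f x < f y
    · simp only [hb, decide_true, if_true]
      refine List.pairwise_cons.mpr ⟨?_, List.pairwise_cons.mpr ⟨hy, hl⟩⟩
      intro z hz
      rcases List.mem_cons.mp hz with rfl | hz
      · omega
      · have := hy z hz; omega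
    · simp only [hb, decide_false, Bool.false_eq_true, if_false]
      refine List.pairwise_cons.mpr ⟨?_, ih hl⟩
      intro z hz
      rw [PySem.List.mem_insertBy] at hz
      rcases hz with rfl | hz
      · omega
      · exact hy z hz

theorem pvFilter_insertBy {α : Type} (p : α → Bool) (f : α → Int) (x : α) (l : List α)
    (h : l.Pairwise (fun a b => f a ≤ f b)) :
    (PySem.List.insertBy (fun a b => decide (f a < f b)) x l).filter p =
      if p x then PySem.List.insertBy (fun a b => decide (f a < f b)) x (l.filter p)
      else l.filter p := by
  induction l with
  | nil => by_cases hp : p x <;> simp [PySem.List.insertBy, hp]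
  | cons y l ih =>
    rw [List.pairwise_cons] at h
    obtain ⟨hy, hl⟩ := h
    simp only [PySem.List.insertBy]
    by_cases hb : f x < f y
    · simp only [hb, decide_true, if_true]
      by_cases hp : p x
      · rw [pvInsertBy_cons_of_all _ x ((y :: l).filter p) ?_]
        · simp [hp]
        · intro z hz
          rw [List.mem_filter] at hz
          rcases List.mem_cons.mp hz.1 with rfl | hz1
          · simp [hb]
          · have := hy z hz1; simp; omega
      · simp [hp]
    · simp only [hb, decide_false, Bool.false_eq_true, if_false]
      by_cases hpy : p y
      · simp only [List.filter_cons_of_pos hpy, PySem.List.insertBy, hb, decide_false,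
          Bool.false_eq_true, if_false, ih hl]
        by_cases hp : p x <;> simp [hp]
      · rw [List.filter_cons_of_neg hpy, List.filter_cons_of_neg hpy, ih hl]

theorem pvFilter_sorted {α : Type} (p : α → Bool) (f : α → Int) (l : List α) :
    (PySem.List.sorted l f false).filter p = PySem.List.sorted (l.filter p) f false := by
  rw [PySem.List.sorted_eq_foldl_insertBy, PySem.List.sorted_eq_foldl_insertBy]
  suffices hh : ∀ acc : List α, acc.Pairwise (fun a b => f a ≤ f b) →
      (l.foldl (fun acc x => PySem.List.insertBy (fun a b => decide (f a < f b)) x acc)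
        acc).filter p =
      (l.filter p).foldl (fun acc x => PySem.List.insertBy (fun a b => decide (f a < f b)) x acc)
        (acc.filter p) by
    exact hh [] (by simp)
  induction l with
  | nil => intro acc _; rfl
  | cons x l ih =>
    intro acc hacc
    simp only [List.foldl_cons]
    rw [ih _ (pvPairwise_insertBy f x acc hacc), pvFilter_insertBy p f x acc hacc]
    by_cases hp : p x
    · simp [hp]
    · simp [hp]
-- cell-level facts
theorem pvGet_cell4_skus (a b c d : List Int) : pvGet (pvCell4 a b c d) "skus" = a := rfl
theorem pvGet_cell4_x (a b c d : List Int) : pvGet (pvCell4 a b c d) "x" = b := rfl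
theorem pvGet_cell4_y (a b c d : List Int) : pvGet (pvCell4 a b c d) "y" = c := rfl
theorem pvGet_cell4_n (a b c d : List Int) : pvGet (pvCell4 a b c d) "n" = d := rfl

theorem pvAddAll_cell4 (rs : List (Int × Int × Int × Int × Int × Int)) (a b c d : List Int) :
    rs.foldl pvAdd (pvCell4 a b c d) =
      pvCell4 (a ++ rs.map (·.2.1)) (b ++ rs.map (·.1)) (c ++ rs.map (·.2.2.1))
        (d ++ rs.map (·.2.2.2.1)) := by
  induction rs generalizing a b c d with
  | nil => simp [pvCell4]
  | cons r rs ih => simp [pvAdd_cell4, ih]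

theorem pvList_eq_map_range {α : Type} (l : List α) (d : α) :
    l = (List.range l.length).map (fun j => l.getD j d) := by
  apply List.ext_getElem
  · simp
  · intro j h1 h2
    simp [List.getD, List.getElem?_eq_getElem, h1]

theorem pvGetD_map_of_lt {α β : Type} (f : α → β) (l : List α) (j : Nat) (d : α) (db : β)
    (h : j < l.length) : (l.map f).getD j db = f (l.getD j d) := by
  simp [List.getD, List.getElem?_eq_getElem, h]

theorem pvSortCell_mkCell (rs : List (Int × Int × Int × Int × Int × Int)) :
    pvASortCell (pvCell4 (rs.map (·.2.1)) (rs.map (·.1)) (rs.map (·.2.2.1))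
        (rs.map (·.2.2.2.1))) =
      pvCell4 ((PySem.List.sorted rs (·.1) false).map (·.2.1))
        ((PySem.List.sorted rs (·.1) false).map (·.1))
        ((PySem.List.sorted rs (·.1) false).map (·.2.2.1))
        ((PySem.List.sorted rs (·.1) false).map (·.2.2.2.1)) := by
  by_cases hn : 1 < rs.length
  · unfold pvASortCell
    simp only [pvGet_cell4_skus, pvGet_cell4_x, pvGet_cell4_y, pvGet_cell4_n]
    rw [if_pos (by simp [PySem.List.len_eq]; omega)]
    have hlen : PySem.List.len (rs.map (·.1)) = ((rs.length : Nat) : Int) := by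
      simp [PySem.List.len_eq]
    rw [hlen, PySem.List.pyRange_zero_nat]
    rw [pvSorted_map (fun k : Nat => (k : Int)) (fun k => PySem.List.pyGetD (rs.map (·.1)) k 0)]
    set r0 : Int × Int × Int × Int × Int × Int := (0, 0, 0, 0, 0, 0) with hr0
    have hσ : PySem.List.sorted (List.range rs.length)
        (fun a : Nat => PySem.List.pyGetD (rs.map (·.1)) (a : Int) 0) false =
        PySem.List.sorted (List.range rs.length) (fun j : Nat => (rs.getD j r0).1) false := by
      apply pvSorted_key_congr_mem
      intro j hj
      rw [List.mem_range] at hj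
      rw [PySem.List.pyGetD_natCast]
      exact pvGetD_map_of_lt _ rs j r0 0 hj
    rw [hσ]
    set σ : List Nat := PySem.List.sorted (List.range rs.length)
      (fun j : Nat => (rs.getD j r0).1) false with hσdef
    have hmemσ : ∀ j ∈ σ, j < rs.length := by
      intro j hj
      have := (PySem.List.sorted_perm (List.range rs.length)
        (fun j : Nat => (rs.getD j r0).1) false).mem_iff.mp hj
      simpa using this
    have hsorted : ∀ (fi : Int × Int × Int × Int × Int × Int → Int),
        (PySem.List.sorted rs (·.1) false).map fi = σ.map (fun j => fi (rs.getD j r0)) := by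
      intro fi
      conv_lhs => rw [pvList_eq_map_range rs r0]
      rw [pvSorted_map (fun j : Nat => rs.getD j r0) (·.1) (List.range rs.length)]
      rw [List.map_map]
      rfl
    have hfield : ∀ (fi : Int × Int × Int × Int × Int × Int → Int),
        (σ.map (fun k : Nat => (k : Int))).map
          (fun k => PySem.List.pyGetD (rs.map fi) k 0) = σ.map (fun j => fi (rs.getD j r0)) := by
      intro fi
      rw [List.map_map]
      apply List.map_congr_left
      intro j hj
      simp only [Function.comp_apply, PySem.List.pyGetD_natCast]
      exact pvGetD_map_of_lt fi rs j r0 0 (hmemσ j hj)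
    simp only [hfield, hsorted]
    rfl
  · have hid : PySem.List.sorted rs (·.1) false = rs := by
      cases rs with
      | nil => rfl
      | cons r t =>
        cases t with
        | nil => rfl
        | cons a b => exfalso; simp [List.length_cons] at hn
    rw [hid]
    unfold pvASortCell
    rw [pvGet_cell4_x, if_neg (by simp [PySem.List.len_eq]; omega)]
-- the set-each-index loop is a map
theorem pvFoldSet_aux {α : Type} (f : α → α) (d : α) :
    ∀ (todo done : List α),
      (List.range' done.length todo.length).foldl
        (fun r k => r.set k (f (r.getD k d))) (done ++ todo) = done ++ todo.map f := by
  intro todo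
  induction todo with
  | nil => intro done; simp
  | cons t todo ih =>
    intro done
    simp only [List.length_cons]
    rw [List.range'_succ, List.foldl_cons]
    have hget : (done ++ t :: todo).getD done.length d = t := by
      simp [List.getD, List.getElem?_append_right (Nat.le_refl _)]
    have hset : (done ++ t :: todo).set done.length (f t) = (done ++ [f t]) ++ todo := by
      rw [List.set_append_right _ _ (Nat.le_refl _)]
      simp
    rw [hget, hset]
    have h2 := ih (done ++ [f t])
    simp only [List.length_append, List.length_singleton] at h2
    simpa using h2
theorem pvFoldSet {α : Type} (f : α → α) (d : α) (row : List α) :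
    (List.range row.length).foldl (fun r k => r.set k (f (r.getD k d))) row = row.map f := by
  have := pvFoldSet_aux f d row []
  simpa [List.range_eq_range'] using this

theorem pvPyRangeOne : PySem.List.pyRange 0 1 1 = [0] := by
  rw [PySem.List.pyRange_one]; rfl

theorem pvPyRangeCast (nl : Int) :
    PySem.List.pyRange 0 nl 1 = (List.range nl.toNat).map (fun k : Nat => (k : Int)) := by
  rw [PySem.List.pyRange_one]
  simp

theorem pvSortFold (sc : List (String × List Int) → List (String × List Int)) :
    ∀ (ks : List Nat) (row : List (List (String × List Int))),
      ks.foldl (fun L (j : Nat) =>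
        PySem.List.pySetD L (0 : Int)
          (PySem.List.pySetD (PySem.List.pyGetD L (0 : Int) []) (j : Int)
            (sc (PySem.List.pyGetD (PySem.List.pyGetD L (0 : Int) []) (j : Int) [])))) [row] =
      [ks.foldl (fun r j => r.set j (sc (r.getD j []))) row] := by
  intro ks
  induction ks with
  | nil => intro row; rfl
  | cons j ks ih =>
    intro row
    rw [List.foldl_cons]
    have hinit : (PySem.List.pySetD [row] (0 : Int)
        (PySem.List.pySetD (PySem.List.pyGetD [row] (0 : Int) []) ((j : Nat) : Int)
          (sc (PySem.List.pyGetD (PySem.List.pyGetD [row] (0 : Int) []) ((j : Nat) : Int) [])))) =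
        [row.set j (sc (row.getD j []))] := by
      simp only [PySem.List.pyGetD_zero_cons, PySem.List.pyGetD_natCast,
        PySem.List.pySetD_natCast]
      exact pySetD_singleton _ _ _ ⟨by omega, by omega⟩
    conv_rhs => rw [List.foldl_cons]
    rw [hinit, ih]

theorem pvGet?_nodup (result : List (Int × List (String × List Int)))
    (p : Int × List (String × List Int)) (hnd : (result.map Prod.fst).Nodup)
    (hp : p ∈ result) :
    PySem.Dict.get? (⟨result⟩ : PySem.Dict Int (List (String × List Int))) p.1 = some p.2 := by
  induction result with
  | nil => cases hp
  | cons q t ih =>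
    rw [List.map_cons, List.nodup_cons] at hnd
    rcases List.mem_cons.mp hp with rfl | hp'
    · simp [PySem.Dict.get?, List.find?]
    · have hne : (q.1 == p.1) = false := by
        apply beq_false_of_ne
        intro he
        exact hnd.1 (he ▸ (List.mem_map.mpr ⟨p, hp', rfl⟩))
      have := ih hnd.2 hp'
      simp only [PySem.Dict.get?, List.find?, hne] at this ⊢
      exact this

theorem pvFlatten_valid (result : List (Int × List (String × List Int))) (nl : Int)
    (hpre : Pre_create_layout_from_result result nl) :
    ∀ r ∈ pvFlatten result, pvValid nl.toNat r := by
  obtain ⟨hnd, hall⟩ := hpre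
  intro r hr
  rw [pvFlatten, List.mem_flatMap] at hr
  obtain ⟨p, hp, hr⟩ := hr
  rw [pvGet?_nodup result p hnd hp] at hr
  simp only [Option.getD_some] at hr
  by_cases hc : PySem.Dict.contains (⟨p.2⟩ : PySem.Dict String (List Int)) "shelf"
  · rw [if_pos hc] at hr
    rw [pvRecsOf, List.mem_map] at hr
    obtain ⟨i, hi, rfl⟩ := hr
    rw [PySem.List.mem_pyRange_one] at hi
    obtain ⟨hi0, hilen⟩ := hi
    rw [PySem.List.len_eq] at hilen
    have hlt : i.toNat < (pvGet p.2 "shelf").length := by omega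
    obtain ⟨_, _, _, _, h5, h6⟩ :=
      ((hall p hp).2 hc).2.2.2.2 i.toNat hlt
    have hsg : PySem.List.pyGetD (pvGet p.2 "shelf") i 0 = (pvGet p.2 "shelf").getD i.toNat 0 := by
      rw [PySem.List.pyGetD_of_nonneg _ _ hi0]
    have hlg : PySem.List.pyGetD (pvGet p.2 "layer") i 0 = (pvGet p.2 "layer").getD i.toNat 0 := by
      rw [PySem.List.pyGetD_of_nonneg _ _ hi0]
    exact ⟨by rw [hsg]; exact h5, by rw [hlg]; exact h6⟩
  · rw [if_neg hc] at hr
    cases hr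
theorem pvMain (result : List (Int × List (String × List Int))) (nl : Int)
    (hpre : Pre_create_layout_from_result result nl) :
    create_layout_from_result result nl = create_layout_from_result_alt result nl := by
  have hvalid := pvFlatten_valid result nl hpre
  have hlay : ((PySem.List.pyRange 0 1 1).map (fun _ =>
      (PySem.List.pyRange 0 nl 1).map (fun _ => pvCellEmpty))) =
      [List.replicate nl.toNat pvCellEmpty] := by
    rw [pvPyRangeOne, pvPyRangeCast, List.map_map]
    rw [show ((fun _ => pvCellEmpty) ∘ fun k : Nat => (k : Int)) = fun _ => pvCellEmpty from rfl]
    simp [List.map_const']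
  set row0 := List.replicate nl.toNat pvCellEmpty with hrow0
  have hrow0len : row0.length = nl.toNat := by simp [hrow0]
  have hvr : ∀ r ∈ pvFlatten result, pvValid row0.length r := by rw [hrow0len]; exact hvalid
  have hsortmem : ∀ r ∈ PySem.List.sorted (pvFlatten result) (fun r => r.1) false,
      pvValid row0.length r := by
    intro r hr
    exact hvr r ((PySem.List.sorted_perm _ _ _).mem_iff.mp hr)
  have hB : create_layout_from_result_alt result nl =
      [pvDistRow (PySem.List.sorted (pvFlatten result) (fun r => r.1) false) row0] := by
    unfold create_layout_from_result_alt
    rw [pvBRecords_eq, hlay]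
    exact pvDist_singleton _ _ hsortmem
  have hA : create_layout_from_result result nl =
      [(pvDistRow (pvFlatten result) row0).map pvASortCell] := by
    unfold create_layout_from_result
    rw [hlay, pvPhase1_eq, pvDist_singleton _ _ hvr]
    rw [pvPyRangeOne, List.foldl_cons, List.foldl_nil]
    rw [pvPyRangeCast, List.foldl_map]
    rw [pvSortFold pvASortCell (List.range nl.toNat) (pvDistRow (pvFlatten result) row0)]
    rw [show nl.toNat = (pvDistRow (pvFlatten result) row0).length by
      rw [pvDistRow_length]; exact hrow0len.symm]
    rw [pvFoldSet]
  rw [hA, hB]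
  congr 1
  apply List.ext_getElem
  · rw [List.length_map, pvDistRow_length, pvDistRow_length]
  · intro j h1 h2
    rw [List.getElem_map]
    have hjm : j < row0.length := by
      rw [List.length_map, pvDistRow_length] at h1; exact h1
    have hlenA : j < (pvDistRow (pvFlatten result) row0).length := by
      rw [pvDistRow_length]; exact hjm
    have hlenB : j < (pvDistRow (PySem.List.sorted (pvFlatten result) (fun r => r.1) false)
        row0).length := by
      rw [pvDistRow_length]; exact hjm
    have hcell0 : row0.getD j [] = pvCellEmpty := by
      rw [hrow0len] at hjm
      simp [hrow0, List.getD, List.getElem?_replicate, hjm]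
    rw [← List.getD_eq_getElem _ [] hlenA, ← List.getD_eq_getElem _ [] hlenB]
    rw [pvDistRow_getD _ _ hvr j hjm, pvDistRow_getD _ _ hsortmem j hjm]
    rw [hcell0, pvCellEmpty_eq, pvAddAll_cell4, pvAddAll_cell4]
    simp only [List.nil_append]
    rw [pvSortCell_mkCell]
    rw [pvFilter_sorted (fun r => pvRes row0.length r.2.2.2.2.2 == j) (fun r => r.1)
      (pvFlatten result)]


-- ===== VERDICT (by name: the statement is the Claim_ definition above) =====
theorem create_layout_from_result_spec : Claim_equal_create_layout_from_result := by
  intro result nl _ hpre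
  unfold Spec_create_layout_from_result
  exact pvMain result nl hpre
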